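-- pv_equiv track=rewrite | github.com/xiliu8006/SVDFor3D | inference_svd_test.py | create_interleaved_sublists
-- ===== SOURCE A (Python) =====
-- def create_interleaved_sublists(data, num_groups=5):
--     first_element = data[0]
--     remaining_data = data[1:]
--
--     group_size = len(remaining_data) // (num_groups - 1)
--     extras = len(remaining_data) % (num_groups - 1)
--
--     groups = []
--     start_index = 0
--     for i in range(num_groups - 1):
--         end_index = start_index + group_size + (1 if i < extras else 0)
--         groups.append(remaining_data[start_index:end_index])
--         start_index = end_index
--
--     result = []
--     max_len = max(len(group) for group in groups)
--     for i in range(max_len):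
--         sublist = [first_element]
--         for group in groups:
--             if i < len(group):
--                 sublist.append(group[i])
--             else:
--                 sublist.append(data[-1])
--
--         result.append(sublist)
--
--     return result
-- ===== SOURCE B (Python) =====
-- def create_interleaved_sublists(data, num_groups=5):
--     first, last = data[0], data[-1]
--     rest = data[1:]
--     k = num_groups - 1
--     q, r = divmod(len(rest), k)
--     max_len = q + (1 if r else 0)
--     rows = [[first] + [last] * k for _ in range(max_len)]
--     cut = r * (q + 1)
--     for idx, x in enumerate(rest):
--         if idx < cut:
--             j, i = divmod(idx, q + 1)
--         else:
--             j, i = divmod(idx - cut, q)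
--             j += r
--         rows[i][j + 1] = x
--     return rows
-- ===== Notes on version B (the rewrite author's own statement) =====
-- stated objective: alternative
-- what changed: B inverts the traversal: instead of A's gather (materialise num_groups-1 slices of the tail, compute max_len, then a nested index-and-length-check transpose loop), B pre-builds the padded rows filled with the last element and makes a single scatter pass over the tail, computing each element's (row, column) cell directly by divmod and writing it in place.
import Mathlib
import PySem

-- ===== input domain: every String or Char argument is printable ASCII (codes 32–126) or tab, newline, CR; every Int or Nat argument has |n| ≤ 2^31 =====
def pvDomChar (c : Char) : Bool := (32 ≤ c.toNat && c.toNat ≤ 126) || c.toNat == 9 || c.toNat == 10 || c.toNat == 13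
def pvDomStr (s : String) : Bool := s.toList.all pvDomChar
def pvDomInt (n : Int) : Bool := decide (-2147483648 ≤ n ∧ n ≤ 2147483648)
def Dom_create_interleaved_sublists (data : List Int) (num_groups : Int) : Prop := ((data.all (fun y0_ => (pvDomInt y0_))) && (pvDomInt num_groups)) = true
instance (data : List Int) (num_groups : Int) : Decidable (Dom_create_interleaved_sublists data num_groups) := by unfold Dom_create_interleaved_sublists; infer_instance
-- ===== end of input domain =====

-- B never builds the groups: it pre-builds the padded rows and scatters each tail
-- element into its (row, column) cell computed by divmod, a single pass replacing
-- A's group-slicing phase and index-checked transpose loop (objective: alternative).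

-- ===== PORT A =====
def create_interleaved_sublists (data : List Int) (num_groups : Int) : List (List Int) :=
  (PySem.List.pyGet? data 0).elim [] (fun first_element =>  -- none = IndexError on empty data (excluded by Pre_)
    let remaining_data := PySem.List.slice data (some 1) none
    (PySem.Int.floordiv? (remaining_data.length : Int) (num_groups - 1)).elim [] (fun group_size =>  -- none = ZeroDivisionError (excluded by Pre_)
      (PySem.Int.mod? (remaining_data.length : Int) (num_groups - 1)).elim [] (fun extras =>
        let st := (PySem.List.pyRange 0 (num_groups - 1) 1).foldl
          (fun (st : List (List Int) × Int) i =>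
            let end_index := st.2 + group_size + (if i < extras then 1 else 0)
            (st.1 ++ [PySem.List.slice remaining_data (some st.2) (some end_index)], end_index))
          ([], 0)
        let groups := st.1
        (PySem.List.max? (groups.map (fun g => (g.length : Int))) (fun x => x)).elim []  -- none = ValueError: max() of empty sequence (excluded by Pre_)
          (fun max_len =>
            (PySem.List.pyRange 0 max_len 1).foldl
              (fun result i =>
                let sublist := groups.foldl
                  (fun sub group =>
                    sub ++ [if i < (group.length : Int)
                            then PySem.List.pyGetD group i 0
                            else PySem.List.pyGetD data (-1) 0])
                  [first_element]
                result ++ [sublist]) []))))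

-- ===== PORT B =====
-- loop body of B's single scatter pass: rows[i][j+1] = x for the cell decoded from idx
def pvStepB (q r cut : Int) (rows : List (List Int)) (p : Int × Int) : List (List Int) :=
  let ji := if p.1 < cut
            then (PySem.Int.divmod? p.1 (q + 1)).getD (0, 0)   -- q + 1 ≥ 1 under Pre_, never none there
            else (((PySem.Int.divmod? (p.1 - cut) q).getD (0, 0)).1 + r,   -- this branch implies q > 0, never none there
                  ((PySem.Int.divmod? (p.1 - cut) q).getD (0, 0)).2)
  PySem.List.pySetD rows ji.2
    (PySem.List.pySetD (PySem.List.pyGetD rows ji.2 []) (ji.1 + 1) p.2)  -- rows[i][j+1] = x (indices always in range under Pre_)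

def create_interleaved_sublists_alt (data : List Int) (num_groups : Int) : List (List Int) :=
  (PySem.List.pyGet? data 0).elim [] (fun first =>  -- none = IndexError on empty data (excluded by Pre_)
    (PySem.List.pyGet? data (-1)).elim [] (fun last =>
      let rest := PySem.List.slice data (some 1) none
      let k := num_groups - 1
      (PySem.Int.divmod? (rest.length : Int) k).elim [] (fun qr =>  -- none = ZeroDivisionError (excluded by Pre_)
        let q := qr.1
        let r := qr.2
        let max_len := q + (if r ≠ 0 then 1 else 0)
        (PySem.List.enumerate rest 0).foldl (pvStepB q r (r * (q + 1)))
          ((PySem.List.pyRange 0 max_len 1).map (fun _ => first :: PySem.List.pyRepeat [last] k)))))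

-- ===== PRECONDITION & SPEC =====
-- Pre_: exactly the inputs A returns on — nonempty data (else data[0] raises IndexError)
-- and num_groups ≥ 2 (num_groups = 1 divides by zero; num_groups ≤ 0 makes groups empty
-- and max() raises ValueError).
def Pre_create_interleaved_sublists (data : List Int) (num_groups : Int) : Prop :=
  data ≠ [] ∧ 2 ≤ num_groups
instance (data : List Int) (num_groups : Int) : Decidable (Pre_create_interleaved_sublists data num_groups) := by unfold Pre_create_interleaved_sublists; infer_instance

def pvWitness_create_interleaved_sublists : List Int × Int := ([5, 1, 2, 3, 4], 3)

def Spec_create_interleaved_sublists (data : List Int) (num_groups : Int) (out : List (List Int)) : Prop := out = create_interleaved_sublists_alt data num_groups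
instance (data : List Int) (num_groups : Int) (out : List (List Int)) : Decidable (Spec_create_interleaved_sublists data num_groups out) := by unfold Spec_create_interleaved_sublists; infer_instance

-- ===== CLAIM (what is proved, stated in full; the proofs are below) =====
def Claim_equal_create_interleaved_sublists : Prop := ∀ (data : List Int) (num_groups : Int), Dom_create_interleaved_sublists data num_groups → Pre_create_interleaved_sublists data num_groups → Spec_create_interleaved_sublists data num_groups (create_interleaved_sublists data num_groups)

-- ===== LEMMAS AND PROOFS =====

-- closed-form start offset and size of group j
def pvStartF (q r j : Int) : Int := j * q + min j r
def pvSizeF (q r j : Int) : Int := q + (if j < r then 1 else 0)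

-- the rows after the first m tail elements have been scattered (m = length at the end)
def pvRowsAt (first last q r k M : Int) (t : List Int) (m : Int) : List (List Int) :=
  (PySem.List.pyRange 0 M 1).map (fun i =>
    first :: (PySem.List.pyRange 0 k 1).map (fun j =>
      if i < pvSizeF q r j ∧ pvStartF q r j + i < m
      then PySem.List.pyGetD t (pvStartF q r j + i) 0 else last))

theorem pvStartF_step (q r j : Int) :
    pvStartF q r j + q + (if j < r then 1 else 0) = pvStartF q r (j + 1) := by
  unfold pvStartF
  have h : (j + 1) * q = j * q + q := by ring
  rw [h]
  rcases lt_or_ge j r with hj | hj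
  · rw [min_eq_left (by omega), min_eq_left (by omega), if_pos hj]; ring
  · rw [min_eq_right (by omega), min_eq_right (by omega), if_neg (by omega)]; ring

theorem pvStartF_bounds (q r j k n : Int) (hq : 0 ≤ q) (hr : 0 ≤ r)
    (hn : q * k + r = n) (hj0 : 0 ≤ j) (hjk : j < k) :
    0 ≤ pvStartF q r j ∧ pvStartF q r j + pvSizeF q r j ≤ n := by
  have hstep := pvStartF_step q r j
  unfold pvStartF pvSizeF at *
  have h1 : 0 ≤ j * q := mul_nonneg hj0 hq
  have h2 : (j + 1) * q ≤ k * q := mul_le_mul_of_nonneg_right (by omega) hq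
  have h3 : k * q = q * k := by ring
  constructor
  · have := min_le_left j r; have := le_min hj0 hr; omega
  · have h4 : min (j+1) r ≤ r := min_le_right _ _
    omega

theorem pvSizeF_nonneg (q r j : Int) (hq : 0 ≤ q) : 0 ≤ pvSizeF q r j := by
  unfold pvSizeF; split_ifs <;> omega

theorem pvStartF_mono (q r a b : Int) (hq : 0 ≤ q) (h : a ≤ b) :
    pvStartF q r a ≤ pvStartF q r b := by
  unfold pvStartF
  have h1 : a * q ≤ b * q := mul_le_mul_of_nonneg_right h hq
  have h2 : min a r ≤ min b r := min_le_min h le_rfl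
  omega

-- a cell's absolute position determines the cell (valid cells only)
theorem pv_cell_inj (q r j i j' i' : Int) (hq : 0 ≤ q)
    (hi0 : 0 ≤ i) (hi : i < pvSizeF q r j) (hi0' : 0 ≤ i') (hi' : i' < pvSizeF q r j')
    (h : pvStartF q r j + i = pvStartF q r j' + i') : j = j' ∧ i = i' := by
  have key : ∀ a b ia ib, 0 ≤ ia → ia < pvSizeF q r a → 0 ≤ ib → a < b →
      pvStartF q r a + ia < pvStartF q r b + ib := by
    intro a b ia ib ha0 ha hb0 hab
    have h1 : pvStartF q r a + pvSizeF q r a = pvStartF q r (a + 1) := by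
      have := pvStartF_step q r a; unfold pvSizeF; omega
    have h2 : pvStartF q r (a + 1) ≤ pvStartF q r b := pvStartF_mono q r _ _ hq (by omega)
    omega
  rcases lt_trichotomy j j' with hlt | heq | hgt
  · exact absurd h (by have := key j j' i i' hi0 hi hi0' hlt; omega)
  · constructor
    · exact heq
    · rw [heq] at h; omega
  · exact absurd h (by have := key j' j i' i hi0' hi' hi0 hgt; omega)

theorem pv_fold_groups (t : List Int) (q r : Int) (m : Nat) : ∀ (a : Int) (gs : List (List Int)), 0 ≤ a →
    (PySem.List.pyRange a (a + (m : Int)) 1).foldl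
      (fun (st : List (List Int) × Int) i =>
        (st.1 ++ [PySem.List.slice t (some st.2) (some (st.2 + q + (if i < r then 1 else 0)))],
         st.2 + q + (if i < r then 1 else 0)))
      (gs, pvStartF q r a)
    = (gs ++ (PySem.List.pyRange a (a + (m : Int)) 1).map
        (fun j => PySem.List.slice t (some (pvStartF q r j)) (some (pvStartF q r j + q + (if j < r then 1 else 0)))),
       pvStartF q r (a + (m : Int))) := by
  induction m with
  | zero =>
    intro a gs _
    rw [show a + ((0:Nat):Int) = a by omega, PySem.List.pyRange_one_eq_nil le_rfl]
    simp
  | succ m ih =>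
    intro a gs ha
    push_cast
    rw [PySem.List.pyRange_one_cons (by omega : a < a + ((m:Int)+1))]
    simp only [List.foldl_cons, List.map_cons]
    have harg : (a + ((m : Int) + 1)) = (a + 1) + (m : Int) := by ring
    rw [harg]
    have hstep := pvStartF_step q r a
    calc (PySem.List.pyRange (a+1) ((a+1) + (m:Int)) 1).foldl
          (fun (st : List (List Int) × Int) i =>
            (st.1 ++ [PySem.List.slice t (some st.2) (some (st.2 + q + (if i < r then 1 else 0)))],
             st.2 + q + (if i < r then 1 else 0)))
          (gs ++ [PySem.List.slice t (some (pvStartF q r a)) (some (pvStartF q r a + q + (if a < r then 1 else 0)))],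
           pvStartF q r a + q + (if a < r then 1 else 0))
        = (gs ++ [PySem.List.slice t (some (pvStartF q r a)) (some (pvStartF q r a + q + (if a < r then 1 else 0)))]
            ++ (PySem.List.pyRange (a+1) ((a+1)+(m:Int)) 1).map
              (fun j => PySem.List.slice t (some (pvStartF q r j)) (some (pvStartF q r j + q + (if j < r then 1 else 0)))),
           pvStartF q r ((a+1) + (m:Int))) := by
          rw [hstep]; exact ih (a+1) _ (by omega)
      _ = _ := by simp

theorem pv_slice_len (t : List Int) (q r j k : Int) (hq : 0 ≤ q) (hr : 0 ≤ r)
    (hqr : q * k + r = (t.length : Int)) (hj0 : 0 ≤ j) (hjk : j < k) :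
    (((PySem.List.slice t (some (pvStartF q r j))
        (some (pvStartF q r j + q + (if j < r then 1 else 0)))).length : Int)) = pvSizeF q r j := by
  obtain ⟨hs0, hse⟩ := pvStartF_bounds q r j k (t.length : Int) hq hr hqr hj0 hjk
  have hsz0 : 0 ≤ pvSizeF q r j := pvSizeF_nonneg q r j hq
  rw [show pvStartF q r j + q + (if j < r then 1 else 0) = pvStartF q r j + pvSizeF q r j from by
    unfold pvSizeF; ring]
  rw [PySem.List.slice_toNat t hs0 (by linarith)]
  simp only [List.length_take, List.length_drop]
  set S := pvStartF q r j
  set Z := pvSizeF q r j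
  omega

theorem pv_slice_get (t : List Int) (q r j k : Int) (hq : 0 ≤ q) (hr : 0 ≤ r)
    (hqr : q * k + r = (t.length : Int)) (hj0 : 0 ≤ j) (hjk : j < k)
    (i : Int) (hi0 : 0 ≤ i) (hi : i < pvSizeF q r j) :
    PySem.List.pyGetD (PySem.List.slice t (some (pvStartF q r j))
        (some (pvStartF q r j + q + (if j < r then 1 else 0)))) i 0
      = PySem.List.pyGetD t (pvStartF q r j + i) 0 := by
  obtain ⟨hs0, hse⟩ := pvStartF_bounds q r j k (t.length : Int) hq hr hqr hj0 hjk
  have hsz0 : 0 ≤ pvSizeF q r j := pvSizeF_nonneg q r j hq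
  rw [show pvStartF q r j + q + (if j < r then 1 else 0) = pvStartF q r j + pvSizeF q r j from by
    unfold pvSizeF; ring]
  rw [PySem.List.slice_toNat t hs0 (by linarith)]
  obtain ⟨iN, rfl⟩ : ∃ iN : Nat, i = (iN : Int) := ⟨i.toNat, by omega⟩
  set S := pvStartF q r j with hSdef
  set Z := pvSizeF q r j with hZdef
  rw [show S + (iN : Int) = ((S.toNat + iN : Nat) : Int) from by omega]
  rw [PySem.List.pyGetD_natCast, PySem.List.pyGetD_natCast]
  rw [List.getD_eq_getElem?_getD, List.getD_eq_getElem?_getD]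
  rw [List.getElem?_take_of_lt (by omega), List.getElem?_drop]

theorem pv_maxlen (q r k : Int) (hr : 0 ≤ r) (hk : 1 ≤ k) :
    PySem.List.max? ((PySem.List.pyRange 0 k 1).map (pvSizeF q r)) (fun x => x)
      = some (q + (if r ≠ 0 then 1 else 0)) := by
  rw [PySem.List.pyRange_one_cons (by omega : (0:Int) < k)]
  rw [List.map_cons, PySem.List.max?_id_cons]
  have h0 : pvSizeF q r 0 = q + (if r ≠ 0 then 1 else 0) := by
    unfold pvSizeF; split_ifs <;> omega
  rw [h0]
  congr 1
  have hub : ∀ y ∈ (PySem.List.pyRange (0+1) k 1).map (pvSizeF q r), y ≤ q + (if r ≠ 0 then 1 else 0) := by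
    intro y hy
    obtain ⟨j, hj, rfl⟩ := List.mem_map.1 hy
    rw [PySem.List.mem_pyRange_one] at hj
    unfold pvSizeF; split_ifs <;> omega
  have hle := (PySem.List.le_foldl_max ((PySem.List.pyRange (0+1) k 1).map (pvSizeF q r)) (q + (if r ≠ 0 then 1 else 0))).1
  rcases PySem.List.foldl_max_mem ((PySem.List.pyRange (0+1) k 1).map (pvSizeF q r)) (q + (if r ≠ 0 then 1 else 0)) with h | h
  · exact h
  · exact le_antisymm (hub _ h) hle

-- A equals the closed row description (with the "written so far" bound saturated)
theorem pv_A_eq (d : Int) (t : List Int) (g q r : Int) (hg : 2 ≤ g)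
    (hq : q = (t.length : Int) / (g-1)) (hr : r = (t.length : Int) % (g-1)) :
    create_interleaved_sublists (d :: t) g =
      pvRowsAt d ((d :: t).getLast (List.cons_ne_nil d t)) q r (g-1)
        (q + (if r ≠ 0 then 1 else 0)) t (t.length : Int) := by
  have hk0 : ¬ (g - 1 = 0) := by omega
  simp only [create_interleaved_sublists,
    PySem.List.pyGet?_zero_cons,
    Option.elim_some, PySem.List.slice_from_one, List.tail_cons,
    PySem.Int.floordiv?, PySem.Int.mod?, hk0, if_false]
  have hb : (0:Int) ≤ g - 1 := by omega
  have hfd : ((t.length : Int)).fdiv (g-1) = (t.length : Int) / (g-1) := by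
    rw [Int.fdiv_eq_ediv, if_pos (Or.inl hb), sub_zero]
  have hfm : ((t.length : Int)).fmod (g-1) = (t.length : Int) % (g-1) := by
    rw [Int.fmod_eq_emod, if_pos (Or.inl hb), add_zero]
  rw [hfd, hfm, ← hq, ← hr]
  have hq0 : 0 ≤ q := hq ▸ Int.ediv_nonneg (Int.natCast_nonneg _) (by omega)
  have hr0 : 0 ≤ r := hr ▸ Int.emod_nonneg _ (by omega)
  have hqr : q * (g - 1) + r = (t.length : Int) := by
    have h := Int.emod_add_mul_ediv (t.length : Int) (g - 1)
    have hc : q * (g - 1) = (g - 1) * q := by ring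
    rw [hq, hr]; linarith [h, hc ▸ (rfl : q * (g-1) = q * (g-1))]
  have hfold := pv_fold_groups t q r (g - 1).toNat 0 [] le_rfl
  rw [show (0:Int) + (((g-1).toNat : Nat) : Int) = g - 1 by omega] at hfold
  rw [show pvStartF q r 0 = 0 from by unfold pvStartF; rw [min_eq_left hr0]; ring] at hfold
  rw [hfold]
  simp only [List.nil_append, List.map_map]
  have hmapc : (PySem.List.pyRange 0 (g-1) 1).map
      ((fun gg : List Int => (gg.length : Int)) ∘
        (fun j => PySem.List.slice t (some (pvStartF q r j)) (some (pvStartF q r j + q + (if j < r then 1 else 0)))))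
      = (PySem.List.pyRange 0 (g-1) 1).map (pvSizeF q r) := by
    apply List.map_congr_left
    intro j hj
    rw [PySem.List.mem_pyRange_one] at hj
    simp only [Function.comp_apply]
    exact pv_slice_len t q r j (g-1) hq0 hr0 hqr hj.1 hj.2
  rw [hmapc, pv_maxlen q r (g-1) hr0 (by omega)]
  simp only [Option.elim_some, PySem.List.foldl_append_singleton_eq_map, List.nil_append,
    List.singleton_append, pvRowsAt]
  apply List.map_congr_left
  intro i hi
  rw [PySem.List.mem_pyRange_one] at hi
  congr 1
  rw [List.map_map]
  apply List.map_congr_left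
  intro j hj
  rw [PySem.List.mem_pyRange_one] at hj
  simp only [Function.comp_apply]
  rw [pv_slice_len t q r j (g-1) hq0 hr0 hqr hj.1 hj.2]
  by_cases hij : i < pvSizeF q r j
  · have hse := (pvStartF_bounds q r j (g-1) (t.length : Int) hq0 hr0 hqr hj.1 hj.2).2
    rw [if_pos hij, pv_slice_get t q r j (g-1) hq0 hr0 hqr hj.1 hj.2 i hi.1 hij,
      if_pos (show i < pvSizeF q r j ∧ pvStartF q r j + i < (t.length : Int) from ⟨hij, by omega⟩)]
  · rw [if_neg hij, if_neg (fun h => hij h.1)]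
    exact PySem.List.pyGetD_neg_one (d :: t) 0 (List.cons_ne_nil d t)


-- divmod with a positive divisor is Euclidean division
theorem pv_divmod_pos (a b : Int) (hb : 0 < b) :
    PySem.Int.divmod? a b = some (a / b, a % b) := by
  have h1 : a.fdiv b = a / b := by
    rw [Int.fdiv_eq_ediv, if_pos (Or.inl (by omega : (0:Int) ≤ b)), sub_zero]
  have h2 : a.fmod b = a % b := by
    rw [Int.fmod_eq_emod, if_pos (Or.inl (by omega : (0:Int) ≤ b)), add_zero]
  simp [PySem.Int.divmod?, (show ¬ b = 0 by omega), h1, h2]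

-- setting one slot of a tabulated list re-tabulates it with the function patched
theorem pv_set_map_pyRange {α : Type} (f : Int → α) (K j0 : Int) (x : α)
    (hj0 : 0 ≤ j0) :
    ((PySem.List.pyRange 0 K 1).map f).set j0.toNat x
      = (PySem.List.pyRange 0 K 1).map (fun j => if j = j0 then x else f j) := by
  apply List.ext_getElem (by simp)
  intro a h1 h2
  rw [List.getElem_set (by simpa using h1), List.getElem_map, List.getElem_map,
    PySem.List.getElem_pyRange_one]
  by_cases h : j0.toNat = a
  · rw [if_pos h, if_pos (by omega)]
  · rw [if_neg h, if_neg (by omega)]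

-- the initial padded rows are pvRowsAt 0 (nothing scattered yet)
theorem pv_rows_init (first last q r k M : Int) (t : List Int) (hq : 0 ≤ q) (hr : 0 ≤ r) :
    (PySem.List.pyRange 0 M 1).map (fun _ => first :: PySem.List.pyRepeat [last] k)
      = pvRowsAt first last q r k M t 0 := by
  unfold pvRowsAt
  apply List.map_congr_left
  intro i hi
  rw [PySem.List.mem_pyRange_one] at hi
  congr 1
  rw [PySem.List.pyRepeat_singleton]
  have h : (PySem.List.pyRange 0 k 1).map (fun j =>
      if i < pvSizeF q r j ∧ pvStartF q r j + i < 0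
      then PySem.List.pyGetD t (pvStartF q r j + i) 0 else last)
      = (PySem.List.pyRange 0 k 1).map (fun _ => last) := by
    apply List.map_congr_left
    intro j hj
    rw [PySem.List.mem_pyRange_one] at hj
    have h1 : 0 ≤ pvStartF q r j := by
      unfold pvStartF
      have := mul_nonneg hj.1 hq
      have := le_min hj.1 hr
      omega
    exact if_neg (fun hc => absurd hc.2 (by omega))
  rw [h, List.map_const', PySem.List.length_pyRange_one]
  simp

-- saturation: once m covers the whole tail, raising the bound changes nothing
theorem pv_rows_sat (first last q r k M : Int) (t : List Int) (m : Int)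
    (hq : 0 ≤ q) (hr : 0 ≤ r) (hqr : q * k + r = (t.length : Int)) (hm : (t.length : Int) ≤ m) :
    pvRowsAt first last q r k M t m = pvRowsAt first last q r k M t (t.length : Int) := by
  unfold pvRowsAt
  apply List.map_congr_left
  intro i hi
  rw [PySem.List.mem_pyRange_one] at hi
  congr 1
  apply List.map_congr_left
  intro j hj
  rw [PySem.List.mem_pyRange_one] at hj
  by_cases hv : i < pvSizeF q r j
  · have := (pvStartF_bounds q r j k (t.length : Int) hq hr hqr hj.1 hj.2).2
    rw [if_pos (show _ from ⟨hv, by omega⟩), if_pos (show _ from ⟨hv, by omega⟩)]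
  · rw [if_neg (fun h => hv h.1), if_neg (fun h => hv h.1)]


-- one scatter step writes tail element m into its decoded cell
theorem pv_step (first last q r k M : Int) (t : List Int) (m : Nat) (x : Int)
    (hq : 0 ≤ q) (hr0 : 0 ≤ r) (hrk : r < k)
    (hqr : q * k + r = (t.length : Int))
    (hM : M = q + (if r ≠ 0 then 1 else 0))
    (hm : m < t.length) (hx : x = PySem.List.pyGetD t (m : Int) 0) :
    pvStepB q r (r * (q + 1)) (pvRowsAt first last q r k M t (m : Int)) ((m : Int), x)
      = pvRowsAt first last q r k M t ((m : Int) + 1) := by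
  have hmn : (m : Int) < (t.length : Int) := by exact_mod_cast hm
  have hm0 : (0 : Int) ≤ (m : Int) := Int.natCast_nonneg m
  -- decode the cell (j0, i0) of absolute position m
  obtain ⟨j0, i0, hpair, hj0, hjk, hi0, hisz, hpos⟩ :
      ∃ j0 i0, (if (m : Int) < r * (q + 1)
                then (PySem.Int.divmod? (m : Int) (q + 1)).getD (0, 0)
                else (((PySem.Int.divmod? ((m : Int) - r * (q + 1)) q).getD (0, 0)).1 + r,
                      ((PySem.Int.divmod? ((m : Int) - r * (q + 1)) q).getD (0, 0)).2)) = (j0, i0)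
        ∧ 0 ≤ j0 ∧ j0 < k ∧ 0 ≤ i0 ∧ i0 < pvSizeF q r j0 ∧ pvStartF q r j0 + i0 = (m : Int) := by
    by_cases hcut : (m : Int) < r * (q + 1)
    · refine ⟨(m : Int) / (q + 1), (m : Int) % (q + 1), ?_, ?_, ?_, ?_, ?_, ?_⟩
      · rw [if_pos hcut, pv_divmod_pos _ _ (by omega)]; rfl
      · exact Int.ediv_nonneg hm0 (show (0:Int) ≤ q + 1 by omega)
      · have hlt : (m : Int) / (q + 1) < r := (Int.ediv_lt_iff_lt_mul (by omega)).2 hcut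
        omega
      · exact Int.emod_nonneg _ (by omega)
      · have h1 : (m : Int) % (q + 1) < q + 1 := Int.emod_lt_of_pos _ (by omega)
        have hlt : (m : Int) / (q + 1) < r := (Int.ediv_lt_iff_lt_mul (by omega)).2 hcut
        unfold pvSizeF; rw [if_pos hlt]; omega
      · have hlt : (m : Int) / (q + 1) < r := (Int.ediv_lt_iff_lt_mul (by omega)).2 hcut
        have hdm : (q + 1) * ((m : Int) / (q + 1)) + (m : Int) % (q + 1) = (m : Int) :=
          Int.ediv_add_emod _ _
        unfold pvStartF
        rw [min_eq_left (by omega)]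
        linear_combination hdm
    · have hqpos : 0 < q := by
        rcases lt_or_ge 0 q with h | h
        · exact h
        · exfalso
          have hq0' : q = 0 := by omega
          subst hq0'
          omega
      set m' : Int := (m : Int) - r * (q + 1) with hm'
      have hm'0 : 0 ≤ m' := by omega
      refine ⟨m' / q + r, m' % q, ?_, ?_, ?_, ?_, ?_, ?_⟩
      · rw [if_neg hcut, pv_divmod_pos _ _ (by omega)]; rfl
      · have := Int.ediv_nonneg hm'0 (le_of_lt hqpos); omega
      · have hm'lt : m' < (k - r) * q := by
          have : r * (q + 1) + (k - r) * q = q * k + r := by ring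
          omega
        have := (Int.ediv_lt_iff_lt_mul (by omega : (0:Int) < q)).2 hm'lt
        omega
      · exact Int.emod_nonneg _ (by omega)
      · have h1 : m' % q < q := Int.emod_lt_of_pos _ (by omega)
        have h2 : 0 ≤ m' / q := Int.ediv_nonneg hm'0 (le_of_lt hqpos)
        unfold pvSizeF; rw [if_neg (by omega)]; omega
      · have h2 : 0 ≤ m' / q := Int.ediv_nonneg hm'0 (le_of_lt hqpos)
        have hdm : q * (m' / q) + m' % q = m' := Int.ediv_add_emod _ _
        unfold pvStartF
        rw [min_eq_right (by omega)]
        linear_combination hdm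
  have hMle : pvSizeF q r j0 ≤ M := by
    rw [hM]; unfold pvSizeF; split_ifs <;> omega
  have hi0M : i0 < M := by omega
  simp only [pvStepB, hpair]
  conv_lhs => rw [pvRowsAt]
  rw [PySem.List.pyGetD_map_pyRange_of_nonneg _ _ _ _ hi0 hi0M,
    PySem.List.pySetD_of_nonneg _ x (by omega : (0:Int) ≤ j0 + 1),
    (by omega : (j0 + 1).toNat = j0.toNat + 1), List.set_cons_succ,
    pv_set_map_pyRange _ k j0 x hj0,
    PySem.List.pySetD_of_nonneg _ _ hi0,
    pv_set_map_pyRange _ M i0 _ hi0, pvRowsAt]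
  apply List.map_congr_left
  intro i hi
  rw [PySem.List.mem_pyRange_one] at hi
  by_cases hii : i = i0
  · subst hii
    rw [if_pos rfl]
    congr 1
    apply List.map_congr_left
    intro j hj
    rw [PySem.List.mem_pyRange_one] at hj
    by_cases hjj : j = j0
    · subst hjj
      rw [if_pos rfl, if_pos (show _ from ⟨hisz, by omega⟩), hpos, hx]
    · rw [if_neg hjj]
      by_cases hv : i < pvSizeF q r j
      · have hne : pvStartF q r j + i ≠ (m : Int) := by
          intro h
          exact hjj (pv_cell_inj q r j i j0 i hq hi.1 hv hi0 hisz (by omega)).1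
        by_cases hlt : pvStartF q r j + i < (m : Int)
        · rw [if_pos (show _ from ⟨hv, hlt⟩), if_pos (show _ from ⟨hv, by omega⟩)]
        · rw [if_neg (fun hc => hlt hc.2), if_neg (fun hc => absurd hc.2 (by omega))]
      · rw [if_neg (fun hc => hv hc.1), if_neg (fun hc => hv hc.1)]
  · rw [if_neg hii]
    congr 1
    apply List.map_congr_left
    intro j hj
    rw [PySem.List.mem_pyRange_one] at hj
    by_cases hv : i < pvSizeF q r j
    · have hne : pvStartF q r j + i ≠ (m : Int) := by
        intro h
        exact hii (pv_cell_inj q r j i j0 i0 hq hi.1 hv hi0 hisz (by omega)).2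
      by_cases hlt : pvStartF q r j + i < (m : Int)
      · rw [if_pos (show _ from ⟨hv, hlt⟩), if_pos (show _ from ⟨hv, by omega⟩)]
      · rw [if_neg (fun hc => hlt hc.2), if_neg (fun hc => absurd hc.2 (by omega))]
    · rw [if_neg (fun hc => hv hc.1), if_neg (fun hc => hv hc.1)]


-- the whole scatter pass: folding the remaining tail saturates the rows
theorem pv_fold (first last q r k M : Int) (t : List Int)
    (hq : 0 ≤ q) (hr0 : 0 ≤ r) (hrk : r < k)
    (hqr : q * k + r = (t.length : Int))
    (hM : M = q + (if r ≠ 0 then 1 else 0)) :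
    ∀ (s : List Int) (m : Nat), t.drop m = s →
      (PySem.List.enumerate s (m : Int)).foldl (pvStepB q r (r * (q + 1)))
          (pvRowsAt first last q r k M t (m : Int))
        = pvRowsAt first last q r k M t (t.length : Int) := by
  intro s
  induction s with
  | nil =>
    intro m hdrop
    have hlen : t.length ≤ m := by
      by_contra h
      have := List.drop_eq_nil_iff.1 hdrop
      omega
    simp only [PySem.List.enumerate_nil, List.foldl_nil]
    exact pv_rows_sat first last q r k M t (m : Int) hq hr0 hqr (by exact_mod_cast hlen)
  | cons x s ih =>
    intro m hdrop
    have hm : m < t.length := by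
      by_contra h
      rw [List.drop_eq_nil_iff.2 (by omega)] at hdrop
      cases hdrop
    have hx : t[m]? = some x := by
      have h2 : (t.drop m)[0]? = t[m + 0]? := List.getElem?_drop
      rw [hdrop] at h2
      simpa using h2.symm
    have hdrop' : t.drop (m + 1) = s := by
      rw [← List.tail_drop, hdrop, List.tail_cons]
    rw [PySem.List.enumerate_cons, List.foldl_cons]
    have hxval : x = PySem.List.pyGetD t (m : Int) 0 := by
      rw [PySem.List.pyGetD_natCast, List.getD_eq_getElem?_getD, hx]
      rfl
    rw [pv_step first last q r k M t m x hq hr0 hrk hqr hM hm hxval,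
      (by push_cast; ring : (m : Int) + 1 = ((m + 1 : Nat) : Int))]
    exact ih (m + 1) hdrop'

-- B equals the same closed row description
theorem pv_B_eq (d : Int) (t : List Int) (g q r : Int) (hg : 2 ≤ g)
    (hq : q = (t.length : Int) / (g-1)) (hr : r = (t.length : Int) % (g-1)) :
    create_interleaved_sublists_alt (d :: t) g =
      pvRowsAt d ((d :: t).getLast (List.cons_ne_nil d t)) q r (g-1)
        (q + (if r ≠ 0 then 1 else 0)) t (t.length : Int) := by
  simp only [create_interleaved_sublists_alt, PySem.List.pyGet?_zero_cons,
    PySem.List.pyGet?_neg_one, List.getLast?_eq_some_getLast (List.cons_ne_nil d t),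
    Option.elim_some, PySem.List.slice_from_one, List.tail_cons]
  rw [pv_divmod_pos _ _ (by omega : (0:Int) < g - 1)]
  simp only [Option.elim_some]
  rw [← hq, ← hr]
  have hq0 : 0 ≤ q := hq ▸ Int.ediv_nonneg (Int.natCast_nonneg _) (by omega)
  have hr0 : 0 ≤ r := hr ▸ Int.emod_nonneg _ (by omega)
  have hrk : r < g - 1 := hr ▸ Int.emod_lt_of_pos _ (by omega)
  have hqr : q * (g - 1) + r = (t.length : Int) := by
    have h := Int.emod_add_mul_ediv (t.length : Int) (g - 1)
    have hc : q * (g - 1) = (g - 1) * q := by ring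
    rw [hq, hr]
    linarith [h, hc ▸ (rfl : q * (g-1) = q * (g-1))]
  rw [pv_rows_init d ((d :: t).getLast (List.cons_ne_nil d t)) q r (g-1)
      (q + (if r ≠ 0 then 1 else 0)) t hq0 hr0]
  have h := pv_fold d ((d :: t).getLast (List.cons_ne_nil d t)) q r (g-1)
      (q + (if r ≠ 0 then 1 else 0)) t hq0 hr0 hrk hqr rfl t 0 (by simp)
  simpa using h

-- ===== VERDICT (by name: the statement is the Claim_ definition above) =====
theorem create_interleaved_sublists_spec : Claim_equal_create_interleaved_sublists := by
  intro data g hdom hpre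
  unfold Spec_create_interleaved_sublists
  obtain ⟨hne, hg⟩ := hpre
  obtain ⟨d, t, rfl⟩ : ∃ d t, data = d :: t := by
    cases data with
    | nil => exact absurd rfl hne
    | cons d t => exact ⟨d, t, rfl⟩
  rw [pv_A_eq d t g _ _ hg rfl rfl, pv_B_eq d t g _ _ hg rfl rfl]
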